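-- pv_equiv track=rewrite | github.com/KirillAI/LeetCoding-Challenge | May/15.py | getMinMaxSum
-- ===== SOURCE A (Python) =====
-- def getMinMaxSum(A):
--     minSum = tmpMinSum = maxSum = tmpMaxSum = A[0]
--     for a in A[1:]:
--         #searching for min sum
--         curMinSum = tmpMinSum + a
--         if curMinSum < 0 and curMinSum < a:
--             tmpMinSum = curMinSum
--         else:
--             tmpMinSum = a
--         minSum = min(minSum, tmpMinSum)
--         #searching for max sum
--         curMaxSum = tmpMaxSum + a
--         if curMaxSum > 0 and curMaxSum > a:
--             tmpMaxSum = curMaxSum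
--         else:
--             tmpMaxSum = a
--         maxSum = max(maxSum, tmpMaxSum)
--     return minSum, maxSum
-- ===== SOURCE B (Python) =====
-- def getMinMaxSum(A):
--     # prefix-sum scan: best subarray ending here = P minus extreme earlier prefix
--     minSum = maxSum = A[0]
--     P = minPref = maxPref = 0
--     for a in A:
--         P += a
--         maxSum = max(maxSum, P - minPref)
--         minSum = min(minSum, P - maxPref)
--         if P < minPref:
--             minPref = P
--         if P > maxPref:
--             maxPref = P
--     return minSum, maxSum
-- ===== Notes on version B (the rewrite author's own statement) =====
-- stated objective: alternative
-- what changed: Replaced the conditional-reset Kadane-style accumulators with a single prefix-sum pass that tracks the running minimum and maximum prefix sums and derives both extremes by subtraction.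
import Mathlib
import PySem

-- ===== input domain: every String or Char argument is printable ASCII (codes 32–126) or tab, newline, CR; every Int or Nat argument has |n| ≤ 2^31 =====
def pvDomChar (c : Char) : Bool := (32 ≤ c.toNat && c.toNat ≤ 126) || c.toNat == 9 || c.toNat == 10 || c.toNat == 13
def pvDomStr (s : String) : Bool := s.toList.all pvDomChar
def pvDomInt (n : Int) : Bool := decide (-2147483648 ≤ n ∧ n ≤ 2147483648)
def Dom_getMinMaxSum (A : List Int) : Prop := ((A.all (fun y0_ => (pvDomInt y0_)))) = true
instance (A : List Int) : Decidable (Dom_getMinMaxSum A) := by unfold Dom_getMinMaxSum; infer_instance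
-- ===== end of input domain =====

-- B replaces A's conditional-reset Kadane-style accumulators with a single prefix-sum pass
-- (running min/max prefix sums, extremes by subtraction); same O(n) cost, alternative algorithm.

-- ===== PORT A =====
-- loop over A[1:] carrying (minSum, tmpMinSum, maxSum, tmpMaxSum)
def getMinMaxSumLoop (l : List Int) (minSum tmpMinSum maxSum tmpMaxSum : Int) : Int × Int :=
  match l with
  | [] => (minSum, maxSum)
  | a :: rest =>
    let curMinSum := tmpMinSum + a
    let tmpMinSum' := if curMinSum < 0 ∧ curMinSum < a then curMinSum else a
    let minSum' := min minSum tmpMinSum'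
    let curMaxSum := tmpMaxSum + a
    let tmpMaxSum' := if curMaxSum > 0 ∧ curMaxSum > a then curMaxSum else a
    let maxSum' := max maxSum tmpMaxSum'
    getMinMaxSumLoop rest minSum' tmpMinSum' maxSum' tmpMaxSum'

def getMinMaxSum (A : List Int) : Int × Int :=
  match A with
  | [] => (0, 0)   -- Python raises IndexError on A[0]; excluded by Pre_
  | a0 :: rest => getMinMaxSumLoop rest a0 a0 a0 a0

-- ===== PORT B =====
-- loop over all of A carrying (minSum, maxSum, P, minPref, maxPref)
def getMinMaxSumAltLoop (l : List Int) (minSum maxSum P minPref maxPref : Int) : Int × Int :=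
  match l with
  | [] => (minSum, maxSum)
  | a :: rest =>
    let P' := P + a
    let maxSum' := max maxSum (P' - minPref)
    let minSum' := min minSum (P' - maxPref)
    let minPref' := if P' < minPref then P' else minPref
    let maxPref' := if P' > maxPref then P' else maxPref
    getMinMaxSumAltLoop rest minSum' maxSum' P' minPref' maxPref'

def getMinMaxSum_alt (A : List Int) : Int × Int :=
  match A with
  | [] => (0, 0)   -- Python raises IndexError on A[0]; excluded by Pre_
  | a0 :: _ => getMinMaxSumAltLoop A a0 a0 0 0 0

-- ===== PRECONDITION & SPEC =====
-- Pre_ excludes only the empty list, on which Python A raises IndexError (A[0]).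
def Pre_getMinMaxSum (A : List Int) : Prop := A ≠ []
instance (A : List Int) : Decidable (Pre_getMinMaxSum A) := by unfold Pre_getMinMaxSum; infer_instance
def pvWitness_getMinMaxSum : List Int := ([-2, 3, -1])

def Spec_getMinMaxSum (A : List Int) (out : Int × Int) : Prop := out = getMinMaxSum_alt A
instance (A : List Int) (out : Int × Int) : Decidable (Spec_getMinMaxSum A out) := by unfold Spec_getMinMaxSum; infer_instance

-- ===== CLAIM (what is proved, stated in full; the proofs are below) =====
def Claim_equal_getMinMaxSum : Prop := ∀ (A : List Int), Dom_getMinMaxSum A → Pre_getMinMaxSum A → Spec_getMinMaxSum A (getMinMaxSum A)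

-- ===== LEMMAS AND PROOFS =====

-- Coupling invariant between A's state and B's state, carried through both loops.
theorem loop_coupling (l : List Int) :
    ∀ (m s M t mn mx P u v : Int),
      m = mn → M = mx →
      ((P - v < 0 ∧ s = P - v ∧ mn ≤ P - v) ∨ (P - v = 0 ∧ 0 ≤ s)) →
      ((0 < P - u ∧ t = P - u ∧ P - u ≤ mx) ∨ (P - u = 0 ∧ t ≤ 0)) →
      getMinMaxSumLoop l m s M t = getMinMaxSumAltLoop l mn mx P u v := by
  induction l with
  | nil =>
    intro m s M t mn mx P u v hm hM _ _
    simp [getMinMaxSumLoop, getMinMaxSumAltLoop, hm, hM]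
  | cons a rest ih =>
    intro m s M t mn mx P u v hm hM hmin hmax
    simp only [getMinMaxSumLoop, getMinMaxSumAltLoop]
    apply ih
    · -- new minSum equal
      subst hm
      split_ifs <;> rcases hmin with ⟨h1, h2, h3⟩ | ⟨h1, h2⟩ <;> omega
    · -- new maxSum equal
      subst hM
      split_ifs <;> rcases hmax with ⟨h1, h2, h3⟩ | ⟨h1, h2⟩ <;> omega
    · -- min-side invariant preserved
      subst hm
      split_ifs <;> rcases hmin with ⟨h1, h2, h3⟩ | ⟨h1, h2⟩ <;> omega
    · -- max-side invariant preserved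
      subst hM
      split_ifs <;> rcases hmax with ⟨h1, h2, h3⟩ | ⟨h1, h2⟩ <;> omega

-- ===== VERDICT (by name: the statement is the Claim_ definition above) =====
theorem getMinMaxSum_spec : Claim_equal_getMinMaxSum := by
  intro A _ hpre
  unfold Spec_getMinMaxSum
  match A with
  | [] => exact absurd rfl hpre
  | a0 :: rest =>
    simp only [getMinMaxSum, getMinMaxSum_alt, getMinMaxSumAltLoop]
    apply loop_coupling <;> (try split_ifs) <;> omega
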